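-- pv_equiv track=rewrite | github.com/sauravkalia/agentvault | agentvault/core/optimizer.py | truncate_code_blocks
-- ===== SOURCE A (Python) =====
-- def truncate_code_blocks(text: str, max_lines: int = 4) -> str:
--   """Truncate long code blocks to first N lines + indicator."""
--   result = []
--   in_code = False
--   code_lines = 0
--   code_truncated = False
--
--   for line in text.split("\n"):
--     if line.strip().startswith("```"):
--       if not in_code:
--         in_code = True
--         code_lines = 0
--         code_truncated = False
--         result.append(line)
--       else:
--         in_code = False
--         if code_truncated:
--           result.append("  ... (truncated)")
--         result.append(line)
--       continue
--
--     if in_code: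
--       code_lines += 1
--       if code_lines <= max_lines:
--         result.append(line)
--       elif not code_truncated:
--         code_truncated = True
--     else:
--       result.append(line)
--
--   return "\n".join(result)
-- ===== SOURCE B (Python) =====
-- def truncate_code_blocks(text: str, max_lines: int = 4) -> str:
--   """Truncate long code blocks to first N lines + indicator."""
--   result = []
--   buffer = None  # None = outside a code block; list = lines collected inside
--   keep = max(0, max_lines)
--
--   for line in text.split("\n"):
--     if line.strip().startswith("```"):
--       if buffer is None:
--         result.append(line)
--         buffer = []
--       else:
--         result.extend(buffer[:keep])
--         if len(buffer) > keep:
--           result.append("  ... (truncated)")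
--         result.append(line)
--         buffer = None
--     elif buffer is not None:
--       buffer.append(line)
--     else:
--       result.append(line)
--
--   if buffer is not None:
--     result.extend(buffer[:keep])
--
--   return "\n".join(result)
-- ===== Notes on version B (the rewrite author's own statement) =====
-- stated objective: simpler
-- what changed: Replaces A's running counter + truncated flag with a buffer that collects each code block's lines and is flushed as a clamped slice (plus indicator iff lines were dropped) at the closing fence or, without indicator, at end of input.
import Mathlib
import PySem

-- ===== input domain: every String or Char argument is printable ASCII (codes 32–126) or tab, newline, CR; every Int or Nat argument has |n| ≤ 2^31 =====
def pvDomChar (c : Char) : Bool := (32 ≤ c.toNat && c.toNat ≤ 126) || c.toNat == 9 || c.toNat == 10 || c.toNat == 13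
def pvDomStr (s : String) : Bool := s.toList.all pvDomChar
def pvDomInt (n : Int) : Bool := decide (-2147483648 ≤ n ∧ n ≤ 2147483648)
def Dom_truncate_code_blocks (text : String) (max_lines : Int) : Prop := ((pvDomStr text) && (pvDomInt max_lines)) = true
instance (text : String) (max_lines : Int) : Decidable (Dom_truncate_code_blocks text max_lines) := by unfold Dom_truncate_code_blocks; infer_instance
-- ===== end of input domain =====

-- B replaces A's running counter/flag pair by a buffer of the current code block,
-- flushed (clamped slice + indicator) at the closing fence: simpler state, same output.

-- B replaces A's running counter/flag pair by a buffer of the current code block,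
-- flushed (clamped slice + truncation indicator) at the closing fence: simpler state, same output.

-- ===== PORT A =====
-- state: (result, in_code, code_lines, code_truncated)
def tcbStepA (max_lines : Int) (st : List String × Bool × Int × Bool) (line : String) :
    List String × Bool × Int × Bool :=
  if PySem.Str.startswith (PySem.Str.strip line) "```" then
    if !st.2.1 then
      (st.1 ++ [line], true, 0, false)
    else
      ((if st.2.2.2 then st.1 ++ ["  ... (truncated)"] else st.1) ++ [line],
       false, st.2.2.1, st.2.2.2)
  else
    if st.2.1 then
      if st.2.2.1 + 1 ≤ max_lines then
        (st.1 ++ [line], st.2.1, st.2.2.1 + 1, st.2.2.2)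
      else if !st.2.2.2 then
        (st.1, st.2.1, st.2.2.1 + 1, true)
      else
        (st.1, st.2.1, st.2.2.1 + 1, st.2.2.2)
    else
      (st.1 ++ [line], st.2.1, st.2.2.1, st.2.2.2)

def truncate_code_blocks (text : String) (max_lines : Int) : String :=
  let st := ((PySem.Str.split? text "\n").getD []).foldl (tcbStepA max_lines) ([], false, 0, false)
  PySem.Str.join "\n" st.1

-- ===== PORT B =====
-- state: (result, buffer); buffer = none outside a code block, some buf inside
def tcbStepB (keep : Int) (st : List String × Option (List String)) (line : String) :
    List String × Option (List String) :=
  if PySem.Str.startswith (PySem.Str.strip line) "```" then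
    match st.2 with
    | none => (st.1 ++ [line], some [])
    | some buf =>
        let r := st.1 ++ PySem.List.slice buf none (some keep)
        let r := if (buf.length : Int) > keep then r ++ ["  ... (truncated)"] else r
        (r ++ [line], none)
  else
    match st.2 with
    | some buf => (st.1, some (buf ++ [line]))
    | none => (st.1 ++ [line], none)

def truncate_code_blocks_alt (text : String) (max_lines : Int) : String :=
  let keep := max 0 max_lines
  let st := ((PySem.Str.split? text "\n").getD []).foldl (tcbStepB keep) ([], none)
  let res := match st.2 with
    | some buf => st.1 ++ PySem.List.slice buf none (some keep)
    | none => st.1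
  PySem.Str.join "\n" res

-- ===== PRECONDITION & SPEC =====
def Spec_truncate_code_blocks (text : String) (max_lines : Int) (out : String) : Prop := out = truncate_code_blocks_alt text max_lines
instance (text : String) (max_lines : Int) (out : String) : Decidable (Spec_truncate_code_blocks text max_lines out) := by unfold Spec_truncate_code_blocks; infer_instance

-- ===== CLAIM (what is proved, stated in full; the proofs are below) =====
def Claim_equal_truncate_code_blocks : Prop := ∀ (text : String) (max_lines : Int), Dom_truncate_code_blocks text max_lines → Spec_truncate_code_blocks text max_lines (truncate_code_blocks text max_lines)

-- ===== LEMMAS AND PROOFS =====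

-- the invariant tying A's (counter, flag) state to B's buffer state
def tcbRel (max_lines : Int) (a : List String × Bool × Int × Bool)
    (b : List String × Option (List String)) : Prop :=
  match b.2 with
  | none => a.1 = b.1 ∧ a.2.1 = false
  | some buf =>
      a.1 = b.1 ++ buf.take (max 0 max_lines).toNat ∧ a.2.1 = true ∧
      a.2.2.1 = (buf.length : Int) ∧
      a.2.2.2 = decide (max 0 max_lines < (buf.length : Int))

theorem tcbStep_rel (max_lines : Int) (a : List String × Bool × Int × Bool)
    (b : List String × Option (List String)) (line : String) (h : tcbRel max_lines a b) :
    tcbRel max_lines (tcbStepA max_lines a line) (tcbStepB (max 0 max_lines) b line) := by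
  obtain ⟨ra, ic, cl, ct⟩ := a
  obtain ⟨rb, buf?⟩ := b
  have hkeep : (0 : Int) ≤ max 0 max_lines := le_max_left _ _
  have hslice : ∀ buf : List String,
      PySem.List.slice buf none (some (max 0 max_lines)) = buf.take (max 0 max_lines).toNat :=
    fun buf => PySem.List.slice_to buf hkeep
  simp only [tcbStepA, tcbStepB]
  by_cases hf : PySem.Str.startswith (PySem.Str.strip line) "```" = true
  · rw [if_pos hf, if_pos hf]
    cases buf? with
    | none =>
        obtain ⟨hr, hic⟩ := h
        simp only at hr hic
        subst hr hic
        -- opening fence: A resets counter and flag, B opens an empty buffer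
        exact ⟨by simp, rfl, rfl, by simp⟩
    | some buf =>
        obtain ⟨hr, hic, hcl, hct⟩ := h
        simp only at hr hic hcl hct
        subst hr hic hcl hct
        -- closing fence: B flushes the clamped buffer and the indicator
        simp only [Bool.not_true, Bool.false_eq_true, if_false, hslice, tcbRel,
          decide_eq_true_eq, gt_iff_lt]
        exact ⟨trivial, trivial⟩
  · rw [if_neg hf, if_neg hf]
    cases buf? with
    | none =>
        obtain ⟨hr, hic⟩ := h
        simp only at hr hic
        subst hr hic
        -- plain line outside a block
        simp only [Bool.false_eq_true, if_false, tcbRel]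
        exact ⟨trivial, trivial⟩
    | some buf =>
        obtain ⟨hr, hic, hcl, hct⟩ := h
        simp only at hr hic hcl hct
        subst hr hic hcl hct
        -- code line: buffered by B, counted by A
        simp only [if_true, tcbRel]
        by_cases hle : (buf.length : Int) + 1 ≤ max_lines
        · -- kept: the buffer is still within the clamp
          have hlen : buf.length < (max 0 max_lines).toNat := by omega
          rw [if_pos hle]
          refine ⟨?_, rfl, by simp, ?_⟩
          · simp only []
            have h1 : (buf ++ [line]).take (max 0 max_lines).toNat = buf ++ [line] :=
              List.take_of_length_le (by simp; omega)
            rw [h1, List.take_of_length_le (by omega), List.append_assoc]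
          · simp only [List.length_append, List.length_singleton]
            rw [decide_eq_decide]
            push_cast
            omega
        · -- dropped: the clamped prefix of the buffer is unchanged
          have hlen : (max 0 max_lines).toNat ≤ buf.length := by omega
          rw [if_neg hle]
          have htake : (buf ++ [line]).take (max 0 max_lines).toNat =
              buf.take (max 0 max_lines).toNat :=
            List.take_append_of_le_length hlen
          by_cases hgt : max 0 max_lines < (buf.length : Int)
          · rw [if_neg (by simp [hgt])]
            refine ⟨by rw [htake], rfl, by simp, ?_⟩
            simp only [List.length_append, List.length_singleton]
            rw [decide_eq_decide]
            push_cast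
            omega
          · rw [if_pos (by simp [hgt])]
            refine ⟨by rw [htake], rfl, by simp, ?_⟩
            simp only [List.length_append, List.length_singleton]
            have h1 : max 0 max_lines < ((buf.length + 1 : Nat) : Int) := by push_cast; omega
            simp only [h1, decide_true]

theorem tcbFoldl_rel (max_lines : Int) (lines : List String)
    (a : List String × Bool × Int × Bool) (b : List String × Option (List String))
    (h : tcbRel max_lines a b) :
    tcbRel max_lines (lines.foldl (tcbStepA max_lines) a)
      (lines.foldl (tcbStepB (max 0 max_lines)) b) := by
  induction lines generalizing a b with
  | nil => exact h
  | cons l ls ih =>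
      rw [List.foldl_cons, List.foldl_cons]
      exact ih _ _ (tcbStep_rel max_lines a b l h)

theorem tcb_final (max_lines : Int) (sa : List String × Bool × Int × Bool)
    (sb : List String × Option (List String)) (h : tcbRel max_lines sa sb) :
    sa.1 = (match sb.2 with
      | some buf => sb.1 ++ PySem.List.slice buf none (some (max 0 max_lines))
      | none => sb.1) := by
  obtain ⟨rb, buf?⟩ := sb
  cases buf? with
  | none => exact h.1
  | some buf =>
      show sa.1 = rb ++ PySem.List.slice buf none (some (max 0 max_lines))
      rw [PySem.List.slice_to buf (le_max_left _ _)]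
      exact h.1

-- ===== VERDICT (by name: the statement is the Claim_ definition above) =====
theorem truncate_code_blocks_spec : Claim_equal_truncate_code_blocks := by
  intro text max_lines _
  unfold Spec_truncate_code_blocks truncate_code_blocks truncate_code_blocks_alt
  exact congrArg (PySem.Str.join "\n")
    (tcb_final max_lines _ _
      (tcbFoldl_rel max_lines ((PySem.Str.split? text "\n").getD [])
        ([], false, 0, false) ([], none) ⟨rfl, rfl⟩))
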